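-- pv_equiv track=rewrite | github.com/esenti/advent-of-code-2019 | 10/1.py | calculate_blocked_positions
-- ===== SOURCE A (Python) =====
-- from math import gcd
--
-- def calculate_blocked_positions(ox, oy, bx, by, width, height):
--     dx = bx - ox
--     dy = by - oy
--
--     d = gcd(dx, dy)
--     dx = dx // d
--     dy = dy // d
--
--     positions = []
--
--     x = bx + dx
--     y = by + dy
--
--     while x >= 0 and y >= 0 and x < width and y < height:
--         positions.append((x, y))
--         x += dx
--         y += dy
--
--     return positions
-- ===== SOURCE B (Python) =====
-- from math import gcd
--
-- def calculate_blocked_positions(ox, oy, bx, by, width, height):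
--     dx = bx - ox
--     dy = by - oy
--
--     d = gcd(dx, dy)
--     dx = dx // d
--     dy = dy // d
--
--     def axis_run(c, s, bound):
--         # max consecutive k >= 1 with 0 <= c + k*s < bound; None = unbounded
--         if s > 0:
--             return max(0, (bound - 1 - c) // s) if c + s >= 0 else 0
--         if s < 0:
--             return max(0, c // (-s)) if c + s < bound else 0
--         return None if 0 <= c < bound else 0
--
--     runs = [r for r in (axis_run(bx, dx, width), axis_run(by, dy, height))
--             if r is not None]
--     n = min(runs)
--     return [(bx + k * dx, by + k * dy) for k in range(1, n + 1)]
-- ===== Notes on version B (the rewrite author's own statement) =====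
-- stated objective: alternative
-- what changed: Replaces A's cell-by-cell while-loop walk along the ray by a closed-form per-axis count of consecutive in-range steps (floor divisions) and builds the result with one range comprehension.
import Mathlib
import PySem

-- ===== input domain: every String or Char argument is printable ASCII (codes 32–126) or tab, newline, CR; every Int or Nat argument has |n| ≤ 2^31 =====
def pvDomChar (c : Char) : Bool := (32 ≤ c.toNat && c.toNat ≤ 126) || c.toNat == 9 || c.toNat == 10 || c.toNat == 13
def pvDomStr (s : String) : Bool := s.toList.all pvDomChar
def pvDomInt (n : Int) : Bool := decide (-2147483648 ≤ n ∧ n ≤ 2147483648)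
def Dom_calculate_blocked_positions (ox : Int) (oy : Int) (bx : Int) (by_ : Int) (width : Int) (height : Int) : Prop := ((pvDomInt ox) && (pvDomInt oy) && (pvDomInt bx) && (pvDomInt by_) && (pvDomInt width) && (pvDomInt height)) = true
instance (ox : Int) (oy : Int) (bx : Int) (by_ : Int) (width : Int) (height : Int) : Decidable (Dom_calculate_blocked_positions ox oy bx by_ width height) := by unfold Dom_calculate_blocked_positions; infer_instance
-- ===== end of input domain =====

-- B replaces A's cell-by-cell while loop by a closed-form count of valid steps per axis
-- (objective: alternative/constant-time instead of walking the ray).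

-- ===== PORT A =====
-- A's while loop, step for step.  The extra '¬(dx = 0 ∧ dy = 0)' conjunct in the guard only
-- makes the recursion total: Python diverges there, and Pre_ excludes the only input
-- ((ox,oy) = (bx,by)) that could reach it (it raises ZeroDivisionError before the loop).
def pvLoopA (dx dy width height x y : Int) : List (Int × Int) :=
  if h : 0 ≤ x ∧ 0 ≤ y ∧ x < width ∧ y < height ∧ ¬(dx = 0 ∧ dy = 0) then
    (x, y) :: pvLoopA dx dy width height (x + dx) (y + dy)
  else []
termination_by (if 0 < dx then (width - x).toNat else if dx < 0 then (x + 1).toNat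
                else if 0 < dy then (height - y).toNat else (y + 1).toNat)
decreasing_by
  split_ifs <;> omega

def calculate_blocked_positions (ox : Int) (oy : Int) (bx : Int) (by_ : Int) (width : Int) (height : Int) : List (Int × Int) :=
  let dx := bx - ox
  let dy := by_ - oy
  let d : Int := Int.gcd dx dy
  let dx := PySem.Int.floordiv dx d
  let dy := PySem.Int.floordiv dy d
  pvLoopA dx dy width height (bx + dx) (by_ + dy)

-- ===== PORT B =====
-- max consecutive k ≥ 1 with 0 ≤ c + k*s < bound; none = unbounded
def pvAxisRun (c s bound : Int) : Option Int :=
  if 0 < s then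
    some (if 0 ≤ c + s then max 0 (PySem.Int.floordiv (bound - 1 - c) s) else 0)
  else if s < 0 then
    some (if c + s < bound then max 0 (PySem.Int.floordiv c (-s)) else 0)
  else if 0 ≤ c ∧ c < bound then none else some 0

def calculate_blocked_positions_alt (ox : Int) (oy : Int) (bx : Int) (by_ : Int) (width : Int) (height : Int) : List (Int × Int) :=
  let dx := bx - ox
  let dy := by_ - oy
  let d : Int := Int.gcd dx dy
  let dx := PySem.Int.floordiv dx d
  let dy := PySem.Int.floordiv dy d
  let runs := ([pvAxisRun bx dx width, pvAxisRun by_ dy height].filterMap id)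
  let n := (PySem.List.min? runs (fun r => r)).getD 0
  (PySem.List.pyRange 1 (n + 1) 1).map (fun k => (bx + k * dx, by_ + k * dy))

-- ===== PRECONDITION & SPEC =====
-- Pre_ excludes exactly (ox,oy) = (bx,by): there gcd(0,0) = 0 and Python A raises ZeroDivisionError.
def Pre_calculate_blocked_positions (ox : Int) (oy : Int) (bx : Int) (by_ : Int) (width : Int) (height : Int) : Prop :=
  ¬ (ox = bx ∧ oy = by_)
instance (ox : Int) (oy : Int) (bx : Int) (by_ : Int) (width : Int) (height : Int) : Decidable (Pre_calculate_blocked_positions ox oy bx by_ width height) := by unfold Pre_calculate_blocked_positions; infer_instance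

def pvWitness_calculate_blocked_positions : Int × Int × Int × Int × Int × Int := (0, 0, 1, 1, 5, 5)

def Spec_calculate_blocked_positions (ox : Int) (oy : Int) (bx : Int) (by_ : Int) (width : Int) (height : Int) (out : List (Int × Int)) : Prop := out = calculate_blocked_positions_alt ox oy bx by_ width height
instance (ox : Int) (oy : Int) (bx : Int) (by_ : Int) (width : Int) (height : Int) (out : List (Int × Int)) : Decidable (Spec_calculate_blocked_positions ox oy bx by_ width height out) := by unfold Spec_calculate_blocked_positions; infer_instance

-- ===== CLAIM (what is proved, stated in full; the proofs are below) =====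
def Claim_equal_calculate_blocked_positions : Prop := ∀ (ox : Int) (oy : Int) (bx : Int) (by_ : Int) (width : Int) (height : Int), Dom_calculate_blocked_positions ox oy bx by_ width height → Pre_calculate_blocked_positions ox oy bx by_ width height → Spec_calculate_blocked_positions ox oy bx by_ width height (calculate_blocked_positions ox oy bx by_ width height)

-- ===== LEMMAS AND PROOFS =====

theorem pvAxisRun_some_spec (c s bound a : Int) (h : pvAxisRun c s bound = some a) :
    0 ≤ a ∧ (∀ k : Int, 1 ≤ k → k ≤ a → 0 ≤ c + k * s ∧ c + k * s < bound) ∧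
      ¬ (0 ≤ c + (a + 1) * s ∧ c + (a + 1) * s < bound) := by
  unfold pvAxisRun at h
  split_ifs at h with hs1 hcs hs2 hcs2 hin
  · -- 0 < s, 0 ≤ c + s
    rw [PySem.Int.floordiv_eq_ediv_of_pos hs1] at h
    have hq1 : (bound - 1 - c) / s * s ≤ bound - 1 - c := Int.ediv_mul_le _ (by omega)
    have hq2 : bound - 1 - c < ((bound - 1 - c) / s + 1) * s := Int.lt_ediv_add_one_mul_self _ hs1
    set q := (bound - 1 - c) / s with hqdef
    have ha := Option.some.inj h
    subst ha
    refine ⟨by omega, ?_, ?_⟩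
    · intro k hk1 hka
      have hkq : k ≤ q := by omega
      have h1 : 1 * s ≤ k * s := mul_le_mul_of_nonneg_right hk1 (by omega)
      have h2 : k * s ≤ q * s := mul_le_mul_of_nonneg_right hkq (by omega)
      constructor <;> nlinarith
    · rintro ⟨g1, g2⟩
      by_cases hq0 : q ≤ 0
      · have hmax : max 0 q = 0 := by omega
        rw [hmax] at g1 g2
        have h3 : (q + 1) * s ≤ 1 * s := mul_le_mul_of_nonneg_right (by omega) (by omega)
        nlinarith
      · have hmax : max 0 q = q := by omega
        rw [hmax] at g1 g2
        nlinarith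
  · -- 0 < s, c + s < 0
    have ha := Option.some.inj h
    subst ha
    refine ⟨le_refl _, by omega, ?_⟩
    rintro ⟨g1, g2⟩
    nlinarith
  · -- s < 0, c + s < bound
    have hpos : 0 < -s := by omega
    rw [PySem.Int.floordiv_eq_ediv_of_pos hpos] at h
    have hq1 : c / (-s) * (-s) ≤ c := Int.ediv_mul_le _ (by omega)
    have hq2 : c < (c / (-s) + 1) * (-s) := Int.lt_ediv_add_one_mul_self _ hpos
    set q := c / (-s) with hqdef
    have ha := Option.some.inj h
    subst ha
    refine ⟨by omega, ?_, ?_⟩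
    · intro k hk1 hka
      have hkq : k ≤ q := by omega
      have h1 : k * s ≤ 1 * s := mul_le_mul_of_nonpos_right hk1 (by omega)
      have h2 : k * (-s) ≤ q * (-s) := mul_le_mul_of_nonneg_right hkq (by omega)
      constructor <;> nlinarith
    · rintro ⟨g1, g2⟩
      by_cases hq0 : q ≤ 0
      · have hmax : max 0 q = 0 := by omega
        rw [hmax] at g1 g2
        have h3 : (q + 1) * (-s) ≤ 1 * (-s) := mul_le_mul_of_nonneg_right (by omega) (by omega)
        nlinarith
      · have hmax : max 0 q = q := by omega
        rw [hmax] at g1 g2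
        nlinarith
  · -- s < 0, bound ≤ c + s
    have ha := Option.some.inj h
    subst ha
    refine ⟨le_refl _, by omega, ?_⟩
    rintro ⟨g1, g2⟩
    nlinarith
  · -- s = 0, out of range (the 'none' branch was discharged by split_ifs)
    have ha := Option.some.inj h
    subst ha
    have hs0 : s = 0 := by omega
    subst hs0
    refine ⟨le_refl _, by omega, ?_⟩
    rintro ⟨g1, g2⟩
    simp at g1 g2
    exact hin ⟨g1, g2⟩

theorem pvAxisRun_none_spec (c s bound : Int) (h : pvAxisRun c s bound = none) :
    s = 0 ∧ 0 ≤ c ∧ c < bound := by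
  unfold pvAxisRun at h
  split_ifs at h with hs1 hs2 hin
  · exact ⟨by omega, hin⟩

theorem pvLoop_from (dx dy w h px py n : Int)
    (hne : ¬ (dx = 0 ∧ dy = 0))
    (hval : ∀ k : Int, 1 ≤ k → k ≤ n →
      0 ≤ px + k * dx ∧ 0 ≤ py + k * dy ∧ px + k * dx < w ∧ py + k * dy < h)
    (hstop : ¬ (0 ≤ px + (n + 1) * dx ∧ 0 ≤ py + (n + 1) * dy ∧
                px + (n + 1) * dx < w ∧ py + (n + 1) * dy < h)) :
    ∀ (m : Nat) (j : Int), 1 ≤ j → j ≤ n + 1 → (n + 1 - j).toNat = m →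
      pvLoopA dx dy w h (px + j * dx) (py + j * dy)
        = (PySem.List.pyRange j (n + 1) 1).map (fun k => (px + k * dx, py + k * dy)) := by
  intro m
  induction m with
  | zero =>
    intro j hj1 hj2 hm
    have hj : j = n + 1 := by omega
    subst hj
    rw [pvLoopA, dif_neg (fun hg => hstop ⟨hg.1, hg.2.1, hg.2.2.1, hg.2.2.2.1⟩),
      PySem.List.pyRange_one_eq_nil (le_refl _)]
    rfl
  | succ m ih =>
    intro j hj1 hj2 hm
    have hjn : j ≤ n := by omega
    obtain ⟨v1, v2, v3, v4⟩ := hval j hj1 hjn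
    rw [pvLoopA, dif_pos ⟨v1, v2, v3, v4, hne⟩,
      PySem.List.pyRange_one_cons (by omega : j < n + 1), List.map_cons]
    have e1 : px + j * dx + dx = px + (j + 1) * dx := by ring
    have e2 : py + j * dy + dy = py + (j + 1) * dy := by ring
    rw [e1, e2, ih (j + 1) (by omega) (by omega) (by omega)]

theorem pvLoop_eq_map (dx dy w h px py n : Int)
    (hne : ¬ (dx = 0 ∧ dy = 0)) (hn : 0 ≤ n)
    (hval : ∀ k : Int, 1 ≤ k → k ≤ n →
      0 ≤ px + k * dx ∧ 0 ≤ py + k * dy ∧ px + k * dx < w ∧ py + k * dy < h)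
    (hstop : ¬ (0 ≤ px + (n + 1) * dx ∧ 0 ≤ py + (n + 1) * dy ∧
                px + (n + 1) * dx < w ∧ py + (n + 1) * dy < h)) :
    pvLoopA dx dy w h (px + dx) (py + dy)
      = (PySem.List.pyRange 1 (n + 1) 1).map (fun k => (px + k * dx, py + k * dy)) := by
  have := pvLoop_from dx dy w h px py n hne hval hstop n.toNat 1 (le_refl _) (by omega) (by omega)
  simpa using this

theorem pvMain (bx by_ width height dx dy : Int) (hne : ¬ (dx = 0 ∧ dy = 0)) :
    pvLoopA dx dy width height (bx + dx) (by_ + dy)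
      = (PySem.List.pyRange 1
          (((PySem.List.min? (([pvAxisRun bx dx width, pvAxisRun by_ dy height].filterMap id))
              (fun r => r)).getD 0) + 1) 1).map (fun k => (bx + k * dx, by_ + k * dy)) := by
  rcases hx : pvAxisRun bx dx width with _ | nx <;>
    rcases hy : pvAxisRun by_ dy height with _ | ny
  · obtain ⟨hdx0, _, _⟩ := pvAxisRun_none_spec _ _ _ hx
    obtain ⟨hdy0, _, _⟩ := pvAxisRun_none_spec _ _ _ hy
    exact absurd ⟨hdx0, hdy0⟩ hne
  · -- x-axis unbounded (dx = 0, bx in range), y-axis gives the count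
    obtain ⟨hdx0, hx0, hx1⟩ := pvAxisRun_none_spec _ _ _ hx
    obtain ⟨hn, hv, hs⟩ := pvAxisRun_some_spec _ _ _ _ hy
    simp only [List.filterMap_cons, List.filterMap_nil, id_eq, PySem.List.min?_id_cons, List.foldl_nil, Option.getD_some]
    refine pvLoop_eq_map dx dy width height bx by_ ny hne hn ?_ ?_
    · intro k hk1 hk2
      obtain ⟨v1, v2⟩ := hv k hk1 hk2
      subst hdx0
      simp only [mul_zero, add_zero]
      exact ⟨hx0, v1, hx1, v2⟩
    · rintro ⟨g1, g2, g3, g4⟩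
      exact hs ⟨g2, g4⟩
  · -- y-axis unbounded (dy = 0, by_ in range), x-axis gives the count
    obtain ⟨hdy0, hy0, hy1⟩ := pvAxisRun_none_spec _ _ _ hy
    obtain ⟨hn, hv, hs⟩ := pvAxisRun_some_spec _ _ _ _ hx
    simp only [List.filterMap_cons, List.filterMap_nil, id_eq, PySem.List.min?_id_cons, List.foldl_nil, Option.getD_some]
    refine pvLoop_eq_map dx dy width height bx by_ nx hne hn ?_ ?_
    · intro k hk1 hk2
      obtain ⟨v1, v2⟩ := hv k hk1 hk2
      subst hdy0
      simp only [mul_zero, add_zero]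
      exact ⟨v1, hy0, v2, hy1⟩
    · rintro ⟨g1, g2, g3, g4⟩
      exact hs ⟨g1, g3⟩
  · -- both axes bounded: the count is the minimum
    obtain ⟨hnx, hvx, hsx⟩ := pvAxisRun_some_spec _ _ _ _ hx
    obtain ⟨hny, hvy, hsy⟩ := pvAxisRun_some_spec _ _ _ _ hy
    simp only [List.filterMap_cons, List.filterMap_nil, id_eq, PySem.List.min?_id_cons, List.foldl_cons, List.foldl_nil, Option.getD_some]
    refine pvLoop_eq_map dx dy width height bx by_ (min nx ny) hne (by omega) ?_ ?_
    · intro k hk1 hk2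
      obtain ⟨vx1, vx2⟩ := hvx k hk1 (by omega)
      obtain ⟨vy1, vy2⟩ := hvy k hk1 (by omega)
      exact ⟨vx1, vy1, vx2, vy2⟩
    · rcases le_total nx ny with hle | hle
      · rw [min_eq_left hle]
        rintro ⟨g1, g2, g3, g4⟩
        exact hsx ⟨g1, g3⟩
      · rw [min_eq_right hle]
        rintro ⟨g1, g2, g3, g4⟩
        exact hsy ⟨g2, g4⟩

-- ===== VERDICT (by name: the statement is the Claim_ definition above) =====
theorem calculate_blocked_positions_spec : Claim_equal_calculate_blocked_positions := by
  intro ox oy bx by_ width height hdom hpre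
  unfold Spec_calculate_blocked_positions calculate_blocked_positions calculate_blocked_positions_alt
  have hg : Int.gcd (bx - ox) (by_ - oy) ≠ 0 := by
    intro hz
    obtain ⟨h1, h2⟩ := Int.gcd_eq_zero_iff.mp hz
    exact hpre ⟨by omega, by omega⟩
  have hdpos : (0 : Int) < (Int.gcd (bx - ox) (by_ - oy) : Int) := by
    exact_mod_cast Nat.pos_of_ne_zero hg
  have hdvdx : ((Int.gcd (bx - ox) (by_ - oy) : Int)) ∣ (bx - ox) := Int.gcd_dvd_left _ _
  have hdvdy : ((Int.gcd (bx - ox) (by_ - oy) : Int)) ∣ (by_ - oy) := Int.gcd_dvd_right _ _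
  have hne : ¬ (PySem.Int.floordiv (bx - ox) (Int.gcd (bx - ox) (by_ - oy) : Int) = 0 ∧
               PySem.Int.floordiv (by_ - oy) (Int.gcd (bx - ox) (by_ - oy) : Int) = 0) := by
    rintro ⟨h1, h2⟩
    rw [PySem.Int.floordiv_eq_ediv_of_pos hdpos] at h1 h2
    have e1 := Int.ediv_mul_cancel hdvdx
    have e2 := Int.ediv_mul_cancel hdvdy
    rw [h1, zero_mul] at e1
    rw [h2, zero_mul] at e2
    exact hpre ⟨by omega, by omega⟩
  exact pvMain bx by_ width height _ _ hne
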